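-- pv_equiv track=rewrite | github.com/danielgonfil/sr5-avionics | air/main.py | get_file_count
-- ===== SOURCE A (Python) =====
-- def get_file_count(dir):
--     file_count = 0
--     for file_name in dir:
--         if ".txt" in file_name:
--             file_name = file_name[:-4]
--             try:
--                 n = int(file_name)
--                 if n > file_count:
--                     file_count = n
--             except:
--                 pass
--     return file_count
-- ===== SOURCE B (Python) =====
-- def get_file_count(dir):
--     vals = [0]
--     for name in dir:
--         if ".txt" in name:
--             try:
--                 vals.append(int(name[:-4]))
--             except:
--                 pass
--     vals.sort()
--     return vals[-1]
-- ===== Notes on version B (the rewrite author's own statement) =====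
-- stated objective: alternative
-- what changed: Replaces the running-max accumulator with a sort-based reduction: candidate values (seeded with 0) are collected into a list, the list is sorted, and the last element is returned.
import Mathlib
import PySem

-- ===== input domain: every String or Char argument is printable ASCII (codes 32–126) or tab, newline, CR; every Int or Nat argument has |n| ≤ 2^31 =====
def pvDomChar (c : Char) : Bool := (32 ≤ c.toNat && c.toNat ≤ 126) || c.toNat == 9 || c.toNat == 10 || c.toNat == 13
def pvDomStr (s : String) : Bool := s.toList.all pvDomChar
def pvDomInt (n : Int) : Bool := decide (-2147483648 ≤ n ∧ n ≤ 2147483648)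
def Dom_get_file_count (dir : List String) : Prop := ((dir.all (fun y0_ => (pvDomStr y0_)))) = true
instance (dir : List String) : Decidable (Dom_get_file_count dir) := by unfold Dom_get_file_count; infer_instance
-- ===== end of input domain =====

-- B replaces A's running-max accumulator by a sort-based reduction (collect candidates seeded with 0, sort, take the last element); same values.


-- ===== PORT A =====
def get_file_count (dir : List String) : Int :=
  dir.foldl (fun file_count file_name =>
    if PySem.Str.isIn ".txt" file_name = true then
      match PySem.Int.ofStr? (PySem.Str.slice file_name none (some (-4))) with
      | some n => if n > file_count then n else file_count
      | none => file_count
    else file_count) 0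

-- ===== PORT B =====
def get_file_count_alt (dir : List String) : Int :=
  let vals : List Int := dir.foldl (fun vals name =>
    if PySem.Str.isIn ".txt" name = true then
      match PySem.Int.ofStr? (PySem.Str.slice name none (some (-4))) with
      | some n => vals ++ [n]
      | none => vals
    else vals) [0]
  let s := PySem.List.sorted vals (fun x => x) false
  match PySem.List.pyGet? s (-1) with
  | some v => v
  | none => 0   -- unreachable: vals always contains 0

-- ===== PRECONDITION & SPEC =====
def Spec_get_file_count (dir : List String) (out : Int) : Prop := out = get_file_count_alt dir
instance (dir : List String) (out : Int) : Decidable (Spec_get_file_count dir out) := by unfold Spec_get_file_count; infer_instance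

-- ===== CLAIM (what is proved, stated in full; the proofs are below) =====
def Claim_equal_get_file_count : Prop := ∀ (dir : List String), Dom_get_file_count dir → Spec_get_file_count dir (get_file_count dir)

-- ===== LEMMAS AND PROOFS =====

-- the common "candidate values" of a directory list
def pvCands (dir : List String) : List Int :=
  dir.filterMap (fun name =>
    if PySem.Str.isIn ".txt" name = true then
      PySem.Int.ofStr? (PySem.Str.slice name none (some (-4)))
    else none)

lemma pv_valsfold_eq (dir : List String) : ∀ (acc : List Int),
    dir.foldl (fun vals name =>
      if PySem.Str.isIn ".txt" name = true then
        match PySem.Int.ofStr? (PySem.Str.slice name none (some (-4))) with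
        | some n => vals ++ [n]
        | none => vals
      else vals) acc = acc ++ pvCands dir := by
  induction dir with
  | nil => intro acc; simp [pvCands]
  | cons hd tl ih =>
    intro acc
    by_cases h : PySem.Str.isIn ".txt" hd = true
    ·  cases hv : PySem.Int.ofStr? (PySem.Str.slice hd none (some (-4))) with
      | some n =>
        simp only [List.foldl_cons, pvCands, List.filterMap_cons, h, ite_true, hv]
        rw [ih]
        simp only [pvCands, List.append_assoc, List.singleton_append]
      | none =>
        simp only [List.foldl_cons, pvCands, List.filterMap_cons, h, ite_true, hv]
        rw [ih]; rfl
    · simp only [List.foldl_cons, pvCands, List.filterMap_cons, h]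
      rw [ih]; rfl

set_option maxHeartbeats 1000000 in
lemma pv_afold_eq (dir : List String) : ∀ (acc : Int),
    dir.foldl (fun file_count file_name =>
      if PySem.Str.isIn ".txt" file_name = true then
        match PySem.Int.ofStr? (PySem.Str.slice file_name none (some (-4))) with
        | some n => if n > file_count then n else file_count
        | none => file_count
      else file_count) acc = List.foldl max acc (pvCands dir) := by
  induction dir with
  | nil => intro acc; simp [pvCands]
  | cons hd tl ih =>
    intro acc
    by_cases h : PySem.Str.isIn ".txt" hd = true
    ·  cases hv : PySem.Int.ofStr? (PySem.Str.slice hd none (some (-4))) with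
      | some n =>
        simp only [List.foldl_cons, pvCands, List.filterMap_cons, h, ite_true, hv]
        rw [ih]
        simp only [pvCands]
        congr 1
        split_ifs <;> omega
      | none =>
        simp only [List.foldl_cons, pvCands, List.filterMap_cons, h, ite_true, hv]
        rw [ih]; rfl
    · simp only [List.foldl_cons, pvCands, List.filterMap_cons, h]
      rw [ih]; rfl

lemma pv_foldl_max_max (l : List Int) : ∀ (a b : Int),
    List.foldl max (max a b) l = max a (List.foldl max b l) := by
  induction l with
  | nil => intro a b; rfl
  | cons x t ih =>
    intro a b
    simp only [List.foldl_cons, max_assoc, ih]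

lemma pv_le_foldl_max (l : List Int) : ∀ (a : Int), a ≤ List.foldl max a l := by
  induction l with
  | nil => intro a; exact le_rfl
  | cons x t ih => intro a; exact le_trans (le_max_left a x) (ih _)

lemma pv_mem_le_foldl_max (l : List Int) : ∀ (a x : Int), x ∈ l → x ≤ List.foldl max a l := by
  induction l with
  | nil => intro a x hx; cases hx
  | cons y t ih =>
    intro a x hx
    rcases List.mem_cons.mp hx with h | h
    · subst h
      exact le_trans (le_max_right a x) (pv_le_foldl_max t _)
    · exact ih (max a y) x h

lemma pv_sorted_getLast? (l : List Int) : ∀ (x : Int),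
    (x :: l).Pairwise (fun a b => a ≤ b) →
    (x :: l).getLast? = some (List.foldl max x l) := by
  induction l with
  | nil => intro x _; rfl
  | cons y t ih =>
    intro x hp
    have hxy : x ≤ y := (List.pairwise_cons.mp hp).1 y (by simp)
    have hp' : (y :: t).Pairwise (fun a b => a ≤ b) := (List.pairwise_cons.mp hp).2
    have h1 : (x :: y :: t).getLast? = (y :: t).getLast? := by
      simp [List.getLast?_cons_cons]
    rw [h1, ih y hp']
    simp [max_eq_right hxy]

lemma pv_main (fm : List Int) :
    List.foldl max 0 fm
      = (match PySem.List.pyGet? (PySem.List.sorted ((0 : Int) :: fm) (fun x => x) false) (-1) with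
         | some v => v
         | none => 0) := by
  cases hs : PySem.List.sorted ((0 : Int) :: fm) (fun x => x) false with
  | nil =>
    have hperm := PySem.List.sorted_perm ((0 : Int) :: fm) (fun x => x) false
    rw [hs] at hperm
    have := hperm.length_eq
    simp at this
  | cons h0 t =>
    have hperm : (h0 :: t).Perm ((0 : Int) :: fm) := by
      rw [← hs]; exact PySem.List.sorted_perm _ _ _
    have hpw : (h0 :: t).Pairwise (fun a b => a ≤ b) := by
      rw [← hs]
      simpa using PySem.List.sorted_pairwise ((0 : Int) :: fm) (fun x => x)
    have hmem0 : (0 : Int) ∈ h0 :: t := hperm.mem_iff.mpr (by simp)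
    have hle : (0 : Int) ≤ List.foldl max h0 t := by
      rcases List.mem_cons.mp hmem0 with h | h
      · rw [← h]; exact pv_le_foldl_max t 0
      · exact pv_mem_le_foldl_max t h0 0 h
    have hfold : List.foldl max 0 ((0 : Int) :: fm) = List.foldl max 0 (h0 :: t) :=
      (hperm.foldl_eq 0).symm
    have hlhs : List.foldl max 0 fm = max 0 (List.foldl max h0 t) := by
      have h1 : List.foldl max 0 fm = List.foldl max 0 ((0 : Int) :: fm) := by
        simp
      rw [h1, hfold, List.foldl_cons, pv_foldl_max_max t 0 h0]
    have hget : PySem.List.pyGet? (h0 :: t) (-1) = some (List.foldl max h0 t) := by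
      rw [PySem.List.pyGet?_neg_one]
      exact pv_sorted_getLast? t h0 hpw
    rw [hlhs, hget]
    simp [max_eq_right hle]

-- ===== VERDICT (by name: the statement is the Claim_ definition above) =====
theorem get_file_count_spec : Claim_equal_get_file_count := by
  intro dir _
  unfold Spec_get_file_count get_file_count get_file_count_alt
  rw [pv_afold_eq dir 0, pv_valsfold_eq dir [0]]
  simpa using pv_main (pvCands dir)
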